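-- pv_equiv track=rewrite | github.com/baris5d/Space-Cakes | Hardest/sort-all/sort-all.py | f
-- ===== SOURCE A (Python) =====
-- def sub_lists(arr,l):
--
--     sublist = []
--
--     for i in range(l + 1):
--
--         for j in range(i + 1, l + 1):
--
--             sub = arr[i:j]
--             sublist.append(sub)
--     return sublist
--
-- def Remove(duplicate):
--     final_list = []
--     for num in duplicate:
--         if num not in final_list:
--             final_list.append(num)
--     return final_list
--
-- def f(values):
--     arr = sub_lists(values, len(values))
--     total_sum = 0
--     # First loop
--     for i in range(0,len(arr)):
--         arr[i] = Remove(arr[i])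
--         # Second loop
--         for key, v in enumerate(arr[i], start=1):
--             total_sum = total_sum + (key * v)
--     return total_sum
-- ===== SOURCE B (Python) =====
-- def f(values):
--     # One pass per start index: extend the subarray one element at a time,
--     # maintaining the set of seen values and the running weighted dedup sum.
--     n = len(values)
--     total = 0
--     for i in range(n):
--         seen = set()
--         w = 0
--         for j in range(i, n):
--             v = values[j]
--             if v not in seen:
--                 seen.add(v)
--                 w += len(seen) * v
--             total += w
--     return total
-- ===== Notes on version B (the rewrite author's own statement) =====
-- stated objective: faster
-- what changed: Instead of materialising all O(n^2) subarrays and deduplicating each from scratch (O(n^4)), B extends each subarray from its start index one element at a time, maintaining the dedup set and the weighted sum incrementally in O(1) amortised per step.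
import Mathlib
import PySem

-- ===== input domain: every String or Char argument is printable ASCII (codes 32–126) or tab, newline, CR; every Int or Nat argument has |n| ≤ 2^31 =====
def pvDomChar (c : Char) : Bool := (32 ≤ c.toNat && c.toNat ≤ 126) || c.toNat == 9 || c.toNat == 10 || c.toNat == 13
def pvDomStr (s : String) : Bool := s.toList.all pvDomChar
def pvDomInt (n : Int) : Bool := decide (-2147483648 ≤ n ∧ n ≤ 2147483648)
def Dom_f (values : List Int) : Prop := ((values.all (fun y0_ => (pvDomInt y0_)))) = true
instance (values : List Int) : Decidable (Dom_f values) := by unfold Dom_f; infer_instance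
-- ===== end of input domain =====

-- B replaces A's materialise-all-subarrays-then-dedup-each scheme (O(n^4)) by extending each
-- subarray from its start index, maintaining the seen-set and the weighted dedup sum incrementally (O(n^2)).
-- (A mutates its local list 'arr' in place; 'values' itself is never mutated, so only the return value matters.)

-- ===== PORT A =====
def subLists (arr : List Int) (l : Int) : List (List Int) :=
  (PySem.List.pyRange 0 (l + 1) 1).foldl (fun sublist i =>
    (PySem.List.pyRange (i + 1) (l + 1) 1).foldl (fun sl j =>
      sl ++ [PySem.List.slice arr (some i) (some j)]) sublist) []

def removeDup (duplicate : List Int) : List Int :=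
  duplicate.foldl (fun finalList num =>
    if num ∈ finalList then finalList else finalList ++ [num]) []

-- Python's 'arr[i] = Remove(arr[i])' writes back into arr, but each entry is read only in its own
-- iteration, so the loop is a fold over the sublists.
def f (values : List Int) : Int :=
  (subLists values (values.length : Int)).foldl (fun totalSum sub =>
    (PySem.List.enumerate (removeDup sub) 1).foldl
      (fun t kv => t + kv.1 * kv.2) totalSum) 0

-- ===== PORT B =====
-- one step of B's inner loop: state = (seen, w, total), next element v
def bstep (st : PySem.Set Int × Int × Int) (v : Int) : PySem.Set Int × Int × Int :=
  if PySem.Set.contains st.1 v then (st.1, st.2.1, st.2.2 + st.2.1)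
  else
    let seen := PySem.Set.add st.1 v
    let w := st.2.1 + PySem.Set.len seen * v
    (seen, w, st.2.2 + w)

def f_alt (values : List Int) : Int :=
  let n : Int := (values.length : Int)
  (PySem.List.pyRange 0 n 1).foldl (fun total i =>
    ((PySem.List.pyRange i n 1).foldl
      (fun st j => bstep st (PySem.List.pyGetD values j 0))
      (PySem.Set.empty, 0, total)).2.2) 0

-- ===== PRECONDITION & SPEC =====
def Spec_f (values : List Int) (out : Int) : Prop := out = f_alt values
instance (values : List Int) (out : Int) : Decidable (Spec_f values out) := by unfold Spec_f; infer_instance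

-- ===== CLAIM (what is proved, stated in full; the proofs are below) =====
def Claim_equal_f : Prop := ∀ (values : List Int), Dom_f values → Spec_f values (f values)

-- ===== LEMMAS AND PROOFS =====

-- weighted sum of a list with weights starting at s: esum [d1,…,dm] s = Σ (s+k-1)*dk
def esum : List Int → Int → Int
  | [], _ => 0
  | x :: xs, s => s * x + esum xs (s + 1)

-- the contribution of one subarray: enumerate(Remove(sub), start=1)
def score (xs : List Int) : Int := esum (PySem.Set.ofList xs) 1

-- sum of scores of xs ++ p over all nonempty prefixes p of ys
def psum : List Int → List Int → Int
  | _, [] => 0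
  | xs, v :: ys => score (xs ++ [v]) + psum (xs ++ [v]) ys

lemma esum_append (xs : List Int) (v s : Int) :
    esum (xs ++ [v]) s = esum xs s + (s + xs.length) * v := by
  induction xs generalizing s with
  | nil => simp [esum]
  | cons x xs ih =>
    simp [esum, ih (s + 1)]
    ring

lemma enum_foldl (d : List Int) (s t : Int) :
    (PySem.List.enumerate d s).foldl (fun t kv => t + kv.1 * kv.2) t = t + esum d s := by
  induction d generalizing s t with
  | nil => simp [PySem.List.enumerate, esum]
  | cons x xs ih =>
    rw [PySem.List.enumerate_cons]
    simp only [List.foldl_cons, ih, esum]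
    ring

lemma removeDup_eq_ofList (xs : List Int) : removeDup xs = PySem.Set.ofList xs := by
  rw [removeDup, PySem.Set.ofList_eq_foldl]
  exact PySem.List.foldl_congr_mem _ _ _ _ (fun acc x _ => by
    rw [PySem.Set.add_eq_ite])

lemma score_append (xs : List Int) (v : Int) :
    score (xs ++ [v]) =
      if v ∈ xs then score xs
      else score xs + (1 + ((PySem.Set.ofList xs).length : Int)) * v := by
  unfold score
  rw [PySem.Set.ofList_append_singleton, PySem.Set.add_eq_ite]
  by_cases h : v ∈ xs
  · simp [PySem.Set.mem_ofList, h]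
  · simp [PySem.Set.mem_ofList, h, esum_append]

lemma binner (ys : List Int) (xs : List Int) (t : Int) :
    (ys.foldl bstep (PySem.Set.ofList xs, score xs, t)).2.2 = t + psum xs ys := by
  induction ys generalizing xs t with
  | nil => simp [psum]
  | cons v ys ih =>
    rw [List.foldl_cons]
    by_cases hv : v ∈ xs
    · have hc : PySem.Set.contains (PySem.Set.ofList xs) v = true := by
        rw [PySem.Set.contains_iff, PySem.Set.mem_ofList]; exact hv
      have ho : PySem.Set.ofList (xs ++ [v]) = PySem.Set.ofList xs := by
        rw [PySem.Set.ofList_append_singleton, PySem.Set.add_eq_ite]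
        simp [PySem.Set.mem_ofList, hv]
      have hs : score (xs ++ [v]) = score xs := by rw [score_append]; simp [hv]
      have hst : bstep (PySem.Set.ofList xs, score xs, t) v
          = (PySem.Set.ofList (xs ++ [v]), score (xs ++ [v]), t + score (xs ++ [v])) := by
        simp only [bstep, hc, if_true]
        rw [ho, hs]
      rw [hst, ih, psum]
      ring
    · have hc : PySem.Set.contains (PySem.Set.ofList xs) v = false := by
        simp [PySem.Set.mem_ofList, hv]
      have hadd : PySem.Set.add (PySem.Set.ofList xs) v = PySem.Set.ofList xs ++ [v] := by
        rw [PySem.Set.add_eq_ite]; simp [PySem.Set.mem_ofList, hv]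
      have ho : PySem.Set.ofList (xs ++ [v]) = PySem.Set.ofList xs ++ [v] := by
        rw [PySem.Set.ofList_append_singleton, hadd]
      have hs : score (xs ++ [v])
          = score xs + (1 + ((PySem.Set.ofList xs).length : Int)) * v := by
        rw [score_append]; simp [hv]
      have hlen : PySem.Set.len (PySem.Set.ofList xs ++ [v])
          = ((PySem.Set.ofList xs).length : Int) + 1 := by
        simp [PySem.Set.len]
      have hst : bstep (PySem.Set.ofList xs, score xs, t) v
          = (PySem.Set.ofList (xs ++ [v]), score (xs ++ [v]), t + score (xs ++ [v])) := by
        simp only [bstep, hc, Bool.false_eq_true, if_false, hadd, hlen, ho, hs, Prod.mk.injEq]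
        refine ⟨trivial, by ring, by ring⟩
      rw [hst, ih, psum]
      ring

lemma psum_eq_sum (ys xs : List Int) :
    psum xs ys = ((List.range ys.length).map (fun k => score (xs ++ ys.take (k + 1)))).sum := by
  induction ys generalizing xs with
  | nil => simp [psum]
  | cons v ys ih =>
    rw [psum, ih (xs ++ [v])]
    simp only [List.length_cons, List.range_succ_eq_map, List.map_cons, List.map_map,
      List.sum_cons]
    congr 1
    refine congrArg List.sum (List.map_congr_left ?_)
    intro k _
    simp [Function.comp, Nat.succ_eq_add_one, List.take_succ_cons, List.append_assoc]

lemma rowA (values : List Int) (i : Int) (hi : 0 ≤ i) :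
    ((PySem.List.pyRange (i + 1) ((values.length : Int) + 1) 1).map
        (fun j => score (PySem.List.slice values (some i) (some j)))).sum
      = psum [] (values.drop i.toNat) := by
  obtain ⟨a, rfl⟩ : ∃ a : Nat, i = (a : Int) := ⟨i.toNat, (Int.toNat_of_nonneg hi).symm⟩
  rw [PySem.List.pyRange_one, List.map_map]
  have hlen : (((values.length : Int) + 1) - ((a : Int) + 1)).toNat = values.length - a := by
    omega
  rw [hlen, psum_eq_sum]
  simp only [Int.toNat_natCast, List.length_drop, List.nil_append]
  refine congrArg List.sum (List.map_congr_left ?_)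
  intro k _
  have hcast : (a : Int) + 1 + (k : Int) = ((a + 1 + k : Nat) : Int) := by push_cast; ring
  simp only [Function.comp, hcast, PySem.List.slice_natCast]
  have h1 : a + 1 + k - a = k + 1 := by omega
  rw [h1]

lemma sum_flatMap_int (l : List Int) (g : Int → List Int) :
    (l.flatMap g).sum = (l.map (fun x => (g x).sum)).sum := by
  induction l with
  | nil => simp
  | cons x xs ih => simp [ih]

lemma fA_eq_sum (values : List Int) :
    f values = ((PySem.List.pyRange 0 ((values.length : Int) + 1) 1).map
      (fun i => psum [] (values.drop i.toNat))).sum := by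
  unfold f
  rw [PySem.List.foldl_congr_mem _ _ (fun total sub => total + score sub) _
    (fun acc sub _ => by rw [removeDup_eq_ofList, enum_foldl]; rfl)]
  rw [PySem.List.foldl_add]
  have hsub : subLists values (values.length : Int)
      = (PySem.List.pyRange 0 ((values.length : Int) + 1) 1).flatMap
          (fun i => (PySem.List.pyRange (i + 1) ((values.length : Int) + 1) 1).map
            (fun j => PySem.List.slice values (some i) (some j))) := by
    unfold subLists
    rw [PySem.List.foldl_congr_mem _ _
      (fun sublist i => sublist ++ (PySem.List.pyRange (i + 1) ((values.length : Int) + 1) 1).map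
        (fun j => PySem.List.slice values (some i) (some j))) _
      (fun acc i _ => by rw [PySem.List.foldl_append_singleton_eq_map])]
    rw [PySem.List.foldl_append_eq_flatMap]
    simp
  rw [hsub, List.map_flatMap, sum_flatMap_int]
  have hrow : ∀ i ∈ PySem.List.pyRange 0 ((values.length : Int) + 1) 1,
      (List.map score (List.map (fun j => PySem.List.slice values (some i) (some j))
        (PySem.List.pyRange (i + 1) ((values.length : Int) + 1) 1))).sum
      = psum [] (values.drop i.toNat) := by
    intro i hi
    rw [List.map_map]
    exact rowA values i (PySem.List.mem_pyRange_one.mp hi).1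
  rw [List.map_congr_left hrow]
  simp

lemma fB_eq_sum (values : List Int) :
    f_alt values = ((PySem.List.pyRange 0 (values.length : Int) 1).map
      (fun i => psum [] (values.drop i.toNat))).sum := by
  unfold f_alt
  rw [PySem.List.foldl_congr_mem _ _ (fun total i => total + psum [] (values.drop i.toNat)) _
    (fun acc i hi => by
      rw [PySem.List.foldl_pyRange_pyGetD' values 0 bstep _
        (PySem.List.mem_pyRange_one.mp hi).1]
      exact binner (values.drop i.toNat) [] acc)]
  rw [PySem.List.foldl_add]
  simp

-- ===== VERDICT (by name: the statement is the Claim_ definition above) =====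
theorem f_spec : Claim_equal_f := by
  intro values _
  unfold Spec_f
  rw [fA_eq_sum, fB_eq_sum]
  rw [PySem.List.pyRange_one_succ_right (by positivity)]
  simp [psum]
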